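-- pv_equiv track=rewrite | github.com/kotontin/PracticalWorks | mod_10_task_7.py | task_10_7
-- ===== SOURCE A (Python) =====
-- def task_10_7(levels: int) -> None:
--     current_number = 1
--     lines = []
--
--     for level in range(levels):
--         spaces = " " * (levels - level - 1)
--         row = ""
--
--         for _ in range(level + 1):
--             if current_number < 10:
--                 row += f" {current_number} "
--             else:
--                 row += f"{current_number} "
--             current_number += 2
--
--         lines.append(f"{' '}{spaces}{row}")
--
--     return lines
-- ===== SOURCE B (Python) =====
-- def task_10_7(levels: int) -> None:
--     m = max(levels, 0)
--     total = m * (m + 1) // 2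
--     nums = [1 + 2 * i for i in range(total)]
--
--     def fmt(n):
--         return f" {n} " if n < 10 else f"{n} "
--
--     return [
--         " " + " " * (levels - level - 1)
--         + "".join(map(fmt, nums[level * (level + 1) // 2 : (level + 1) * (level + 2) // 2]))
--         for level in range(levels)
--     ]
-- ===== Notes on version B (the rewrite author's own statement) =====
-- stated objective: alternative
-- what changed: Replaces A's running counter mutated across two nested loops by a flat precomputed list of the odd values, with each row obtained by closed-form triangular-number slicing and joined via map, assembled in a single comprehension.
import Mathlib
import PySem

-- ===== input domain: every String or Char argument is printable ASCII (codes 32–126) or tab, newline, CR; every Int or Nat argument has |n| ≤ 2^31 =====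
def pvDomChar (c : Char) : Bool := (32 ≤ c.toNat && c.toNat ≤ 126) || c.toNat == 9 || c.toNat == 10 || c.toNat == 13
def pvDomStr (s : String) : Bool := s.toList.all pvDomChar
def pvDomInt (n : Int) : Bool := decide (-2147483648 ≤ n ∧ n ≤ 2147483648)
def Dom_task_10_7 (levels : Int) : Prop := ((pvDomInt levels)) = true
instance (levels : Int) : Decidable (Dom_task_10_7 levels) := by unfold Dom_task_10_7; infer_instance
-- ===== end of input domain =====

-- B replaces A's running counter mutated across two nested loops by a flat precomputed
-- list of the odd values, sliced per row at triangular-number offsets (objective: alternative).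

-- ===== PORT A =====
-- strings are built on the List Char side (PySem style, exact) and wrapped with String.ofList when stored
def task_10_7 (levels : Int) : List String :=
  ((PySem.List.pyRange 0 levels 1).foldl
    (fun (st : Int × List String) level =>
      let spaces : List Char := PySem.List.pyRepeat [' '] (levels - level - 1)
      let inner := (PySem.List.pyRange 0 (level + 1) 1).foldl
        (fun (q : Int × List Char) _ =>
          let row := if q.1 < 10
            then q.2 ++ ([' '] ++ PySem.Int.toChars q.1 ++ [' '])
            else q.2 ++ (PySem.Int.toChars q.1 ++ [' '])
          (q.1 + 2, row)) (st.1, ([] : List Char))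
      (inner.1, st.2 ++ [String.ofList ([' '] ++ spaces ++ inner.2)]))
    (1, ([] : List String))).2

-- ===== PORT B =====
def fmtB (n : Int) : List Char :=
  if n < 10 then [' '] ++ PySem.Int.toChars n ++ [' '] else PySem.Int.toChars n ++ [' ']

def task_10_7_alt (levels : Int) : List String :=
  let m := max levels 0
  let total := PySem.Int.floordiv (m * (m + 1)) 2
  let nums := (PySem.List.pyRange 0 total 1).map (fun i => 1 + 2 * i)
  (PySem.List.pyRange 0 levels 1).map (fun level =>
    let lo := PySem.Int.floordiv (level * (level + 1)) 2
    let hi := PySem.Int.floordiv ((level + 1) * (level + 2)) 2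
    let row := PySem.Chars.join [] ((PySem.List.slice nums (some lo) (some hi)).map fmtB)
    String.ofList ([' '] ++ PySem.List.pyRepeat [' '] (levels - level - 1) ++ row))

-- ===== PRECONDITION & SPEC =====
def Spec_task_10_7 (levels : Int) (out : List String) : Prop := out = task_10_7_alt levels
instance (levels : Int) (out : List String) : Decidable (Spec_task_10_7 levels out) := by unfold Spec_task_10_7; infer_instance

-- ===== CLAIM (what is proved, stated in full; the proofs are below) =====
def Claim_equal_task_10_7 : Prop := ∀ (levels : Int), Dom_task_10_7 levels → Spec_task_10_7 levels (task_10_7 levels)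

-- ===== LEMMAS AND PROOFS =====

def tri : Nat → Nat
  | 0 => 0
  | n + 1 => tri n + (n + 1)

def rowChars (c : Int) (k : Nat) : List Char :=
  ((List.range k).map (fun (j : Nat) => fmtB (c + 2 * (j : Int)))).flatten

def lineSpec (levels level : Int) : String :=
  String.ofList ([' '] ++ PySem.List.pyRepeat [' '] (levels - level - 1) ++
    rowChars (1 + 2 * (tri level.toNat : Int)) (level.toNat + 1))

lemma two_tri (n : Nat) : 2 * tri n = n * (n + 1) := by
  induction n with
  | zero => rfl
  | succ n ih => simp only [tri]; nlinarith [ih]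

lemma tri_succ (n : Nat) : tri (n + 1) = tri n + (n + 1) := rfl

lemma tri_mono {a b : Nat} (h : a ≤ b) : tri a ≤ tri b := by
  induction b with
  | zero => cases Nat.le_zero.mp h; exact le_refl _
  | succ b ih =>
    rcases Nat.lt_or_ge a (b + 1) with h' | h'
    · have := ih (by omega); rw [tri_succ]; omega
    · have : a = b + 1 := by omega
      subst this; exact le_refl _

lemma floordiv_tri (n : Nat) :
    PySem.Int.floordiv ((n : Int) * ((n : Int) + 1)) 2 = (tri n : Int) := by
  rw [PySem.Int.floordiv_eq_iff_of_pos (by norm_num)]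
  have h := two_tri n
  constructor
  · nlinarith [h]
  · nlinarith [h]

lemma rowChars_succ (c : Int) (k : Nat) :
    rowChars c (k + 1) = fmtB c ++ rowChars (c + 2) k := by
  simp only [rowChars]
  rw [List.range_succ_eq_map, List.map_cons, List.flatten_cons, List.map_map]
  congr 1
  · norm_num
  · congr 1
    apply List.map_congr_left
    intro j _
    simp only [Function.comp_apply]
    congr 1
    push_cast
    ring

lemma join_nil_flatten (xss : List (List Char)) : PySem.Chars.join [] xss = xss.flatten := by
  induction xss with
  | nil => rfl
  | cons x xs ih =>
    cases xs with
    | nil => simp [PySem.Chars.join, List.intercalate]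
    | cons y ys =>
      simp only [PySem.Chars.join, List.intercalate] at ih ⊢
      rw [List.intersperse_cons₂, List.flatten_cons, List.flatten_cons, ih]
      simp

lemma innerA (l : List Int) (c : Int) (row : List Char) :
    l.foldl (fun (q : Int × List Char) _ =>
      let r := if q.1 < 10
        then q.2 ++ ([' '] ++ PySem.Int.toChars q.1 ++ [' '])
        else q.2 ++ (PySem.Int.toChars q.1 ++ [' '])
      (q.1 + 2, r)) (c, row)
    = (c + 2 * l.length, row ++ rowChars c l.length) := by
  induction l generalizing c row with
  | nil => simp [rowChars]
  | cons a t ih =>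
    simp only [List.foldl_cons]
    have hbody : (if c < 10
        then row ++ ([' '] ++ PySem.Int.toChars c ++ [' '])
        else row ++ (PySem.Int.toChars c ++ [' '])) = row ++ fmtB c := by
      simp only [fmtB]; split_ifs <;> rfl
    show List.foldl _ (c + 2, if c < 10
        then row ++ ([' '] ++ PySem.Int.toChars c ++ [' '])
        else row ++ (PySem.Int.toChars c ++ [' '])) t = _
    rw [hbody, ih]
    refine Prod.ext ?_ ?_
    · simp only [List.length_cons]; push_cast; ring
    · simp only [List.length_cons]
      rw [rowChars_succ, List.append_assoc]

lemma range_slice (T L : Nat) (h : tri (L + 1) ≤ T) :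
    PySem.List.slice ((List.range T).map (fun (k : Nat) => (1 : Int) + 2 * (k : Int)))
      (some (tri L : Int)) (some (tri (L + 1) : Int))
    = (List.range (L + 1)).map (fun (j : Nat) => (1 : Int) + 2 * ((tri L : Int) + (j : Int))) := by
  rw [PySem.List.slice_natCast]
  have hL : tri L + (L + 1) ≤ T := by rw [tri_succ] at h; omega
  have hts : tri (L + 1) - tri L = L + 1 := by rw [tri_succ]; omega
  apply List.ext_getElem
  · simp [hts]; omega
  · intro i h1 h2
    simp only [List.length_take, List.length_drop, List.length_map, List.length_range, hts] at h1
    have hi : i < L + 1 := by omega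
    have hiT : tri L + i < T := by omega
    simp [List.getElem_take, List.getElem_drop, List.getElem_map, List.getElem_range]

lemma outerA (levels : Int) (m : Nat) (h : (m : Int) ≤ levels) :
    (PySem.List.pyRange 0 (m : Int) 1).foldl
      (fun (st : Int × List String) level =>
        let spaces : List Char := PySem.List.pyRepeat [' '] (levels - level - 1)
        let inner := (PySem.List.pyRange 0 (level + 1) 1).foldl
          (fun (q : Int × List Char) _ =>
            let row := if q.1 < 10
              then q.2 ++ ([' '] ++ PySem.Int.toChars q.1 ++ [' '])
              else q.2 ++ (PySem.Int.toChars q.1 ++ [' '])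
            (q.1 + 2, row)) (st.1, ([] : List Char))
        (inner.1, st.2 ++ [String.ofList ([' '] ++ spaces ++ inner.2)]))
      (1, ([] : List String))
    = (1 + 2 * (tri m : Int), (PySem.List.pyRange 0 (m : Int) 1).map (lineSpec levels)) := by
  induction m with
  | zero =>
    simp [PySem.List.pyRange_one_eq_nil (by norm_num : (0:Int) ≤ 0), tri]
  | succ m ih =>
    have hm : (m : Int) ≤ levels := by push_cast at h ⊢; omega
    rw [show (((m + 1 : Nat) : Int)) = (m : Int) + 1 from by push_cast; ring]
    rw [PySem.List.pyRange_one_succ_right (by positivity), List.foldl_append,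
      List.map_append, ih hm]
    simp only [List.foldl_cons, List.foldl_nil, List.map_cons, List.map_nil]
    rw [innerA]
    have hlenN : (PySem.List.pyRange 0 ((m : Int) + 1) 1).length = m + 1 := by
      rw [PySem.List.length_pyRange_one]; omega
    rw [hlenN]
    refine Prod.ext ?_ ?_
    · simp only [tri_succ]; push_cast; ring
    · simp only [lineSpec, Int.toNat_natCast, List.nil_append]

lemma outer_eq_map (levels : Int) (hpos : 0 < levels) :
    task_10_7 levels = (PySem.List.pyRange 0 levels 1).map (lineSpec levels) := by
  have hN : ((levels.toNat : Nat) : Int) = levels := by omega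
  unfold task_10_7
  rw [← hN]
  rw [outerA ((levels.toNat : Nat) : Int) levels.toNat (le_refl _)]

-- ===== VERDICT (by name: the statement is the Claim_ definition above) =====
theorem task_10_7_spec : Claim_equal_task_10_7 := by
  intro levels _
  unfold Spec_task_10_7
  by_cases hle : levels ≤ 0
  · unfold task_10_7 task_10_7_alt
    rw [PySem.List.pyRange_one_eq_nil hle]
    simp
  · have hpos : 0 < levels := by omega
    rw [outer_eq_map levels hpos]
    unfold task_10_7_alt
    have hmax : max levels 0 = levels := by omega
    have hN : ((levels.toNat : Nat) : Int) = levels := by omega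
    simp only [hmax]
    apply List.map_congr_left
    intro level hmem
    rw [PySem.List.mem_pyRange_one] at hmem
    obtain ⟨h0, hlt⟩ := hmem
    have hL : ((level.toNat : Nat) : Int) = level := by omega
    have hLN : level.toNat + 1 ≤ levels.toNat := by omega
    have hlo : PySem.Int.floordiv (level * (level + 1)) 2 = (tri level.toNat : Int) := by
      rw [← hL]; exact floordiv_tri level.toNat
    have hhi : PySem.Int.floordiv ((level + 1) * (level + 2)) 2 = (tri (level.toNat + 1) : Int) := by
      have he : (level + 1) * (level + 2)
          = ((level.toNat + 1 : Nat) : Int) * (((level.toNat + 1 : Nat) : Int) + 1) := by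
        push_cast; rw [hL]; ring
      rw [he]; exact floordiv_tri (level.toNat + 1)
    have htot : PySem.Int.floordiv (levels * (levels + 1)) 2 = (tri levels.toNat : Int) := by
      rw [← hN]; exact floordiv_tri levels.toNat
    simp only [hlo, hhi, htot]
    have hnums : (PySem.List.pyRange 0 ((tri levels.toNat : Nat) : Int) 1).map
        (fun i => (1 : Int) + 2 * i)
        = (List.range (tri levels.toNat)).map (fun (k : Nat) => (1 : Int) + 2 * (k : Int)) := by
      rw [PySem.List.pyRange_one, List.map_map]
      have : (((tri levels.toNat : Nat) : Int) - 0).toNat = tri levels.toNat := by omega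
      rw [this]
      apply List.map_congr_left
      intro k _
      simp only [Function.comp_apply]
      norm_num
    rw [hnums, range_slice _ _ (tri_mono hLN), List.map_map, join_nil_flatten]
    simp only [lineSpec, rowChars]
    congr 3
    apply List.map_congr_left
    intro j _
    simp only [Function.comp_apply]
    congr 1
    ring
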